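-- pv_equiv track=rewrite | github.com/emilrueh/helpinghands | helpinghands/utility/data.py | remove_duplicate_words
-- ===== SOURCE A (Python) =====
-- from collections import Counter
--
-- def remove_duplicate_words(input_string):
--     counts = Counter(input_string.lower().split())
--     words = input_string.split()
--     result = []
--     for word in words:
--         if counts[word.lower()] > 1:
--             counts[word.lower()] -= 1
--         else:
--             result.append(word)
--     return " ".join(result)
-- ===== SOURCE B (Python) =====
-- def remove_duplicate_words(input_string):
--     seen = set()
--     result = []
--     for word in reversed(input_string.split()):
--         lw = word.lower()
--         if lw not in seen:
--             seen.add(lw)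
--             result.append(word)
--     result.reverse()
--     return " ".join(result)
-- ===== Notes on version B (the rewrite author's own statement) =====
-- stated objective: simpler
-- what changed: Replaces A's Counter precompute over a lowered copy plus a forward decrement loop by a single reverse pass with a set of lowered words already kept, reversing the result at the end.
import Mathlib
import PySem

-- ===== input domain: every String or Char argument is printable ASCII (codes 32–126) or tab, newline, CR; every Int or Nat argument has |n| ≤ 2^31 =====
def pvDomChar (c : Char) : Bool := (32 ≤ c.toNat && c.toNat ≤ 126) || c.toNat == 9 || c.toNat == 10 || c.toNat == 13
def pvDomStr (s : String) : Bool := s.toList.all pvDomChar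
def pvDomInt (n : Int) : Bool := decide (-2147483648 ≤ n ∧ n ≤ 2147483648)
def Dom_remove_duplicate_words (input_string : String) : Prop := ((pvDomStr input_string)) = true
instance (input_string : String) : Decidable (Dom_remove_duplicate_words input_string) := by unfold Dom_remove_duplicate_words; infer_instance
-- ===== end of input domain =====

-- B replaces A's Counter-over-lowered-copy plus forward decrement loop by a single
-- reverse pass with a set of lowered words already kept (objective: simpler).

-- ===== PORT A =====
def remove_duplicate_words (input_string : String) : String :=
  let counts := PySem.Dict.counter (PySem.Str.split₀ (PySem.Str.lower input_string))
  let words := PySem.Str.split₀ input_string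
  let st := words.foldl
    (fun (st : PySem.Dict String Int × List String) word =>
      if st.1.getD (PySem.Str.lower word) 0 > 1 then
        (st.1.modify (PySem.Str.lower word) 0 (· - 1), st.2)
      else
        (st.1, st.2 ++ [word]))
    (counts, [])
  PySem.Str.join " " st.2

-- ===== PORT B =====
def remove_duplicate_words_alt (input_string : String) : String :=
  let st := (PySem.Str.split₀ input_string).reverse.foldl
    (fun (st : PySem.Set String × List String) word =>
      let lw := PySem.Str.lower word
      if st.1.contains lw then st else (st.1.add lw, st.2 ++ [word]))
    (PySem.Set.empty, [])
  PySem.Str.join " " st.2.reverse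

-- ===== PRECONDITION & SPEC =====
def Spec_remove_duplicate_words (input_string : String) (out : String) : Prop := out = remove_duplicate_words_alt input_string
instance (input_string : String) (out : String) : Decidable (Spec_remove_duplicate_words input_string out) := by unfold Spec_remove_duplicate_words; infer_instance

-- ===== CLAIM (what is proved, stated in full; the proofs are below) =====
def Claim_equal_remove_duplicate_words : Prop := ∀ (input_string : String), Dom_remove_duplicate_words input_string → Spec_remove_duplicate_words input_string (remove_duplicate_words input_string)

-- ===== LEMMAS AND PROOFS =====

-- `lowerChar` never makes a character (non-)whitespace
theorem isspace_of_letter_range (c : Char) (h1 : 65 ≤ c.toNat) (h2 : c.toNat ≤ 122) :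
    PySem.Chars.isspace c = false := by
  unfold PySem.Chars.isspace
  simp only [Bool.or_eq_false_iff, Bool.and_eq_false_iff, decide_eq_false_iff_not]
  omega

theorem isspace_lowerChar (c : Char) :
    PySem.Chars.isspace (PySem.Chars.lowerChar c) = PySem.Chars.isspace c := by
  unfold PySem.Chars.lowerChar PySem.Chars.isupper
  split
  · rename_i h
    simp at h
    have h1 : 65 ≤ c.toNat := h.1
    have h2 : c.toNat ≤ 90 := h.2
    have ht : (Char.ofNat (c.toNat + 32)).toNat = c.toNat + 32 := by
      rw [Char.toNat_ofNat, if_pos]; left; omega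
    rw [isspace_of_letter_range _ (by omega) (by omega),
        isspace_of_letter_range c (by omega) (by omega)]
  · rfl

theorem split₀_go_lower (s cur : List Char) (acc : List (List Char)) :
    PySem.Chars.split₀.go (s.map PySem.Chars.lowerChar) (cur.map PySem.Chars.lowerChar)
        (acc.map (List.map PySem.Chars.lowerChar))
      = (PySem.Chars.split₀.go s cur acc).map (List.map PySem.Chars.lowerChar) := by
  induction s generalizing cur acc with
  | nil =>
    simp [PySem.Chars.split₀.go, List.isEmpty_iff]
    split <;> simp [*, List.map_reverse]
  | cons c rest ih =>
    simp only [List.map_cons, PySem.Chars.split₀.go, isspace_lowerChar]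
    split
    · by_cases hc : cur = []
      · subst hc; simpa using ih [] acc
      · rw [if_neg (by simpa using hc), if_neg (by simpa using hc)]
        have := ih [] (cur.reverse :: acc)
        simpa [List.map_reverse] using this
    · exact ih (c :: cur) acc

theorem split₀_lower (s : String) :
    PySem.Str.split₀ (PySem.Str.lower s) = (PySem.Str.split₀ s).map PySem.Str.lower := by
  unfold PySem.Str.split₀
  have hl : (PySem.Str.lower s).toList = s.toList.map PySem.Chars.lowerChar := by
    rw [PySem.Str.toList_lower]; rfl
  rw [hl]
  unfold PySem.Chars.split₀
  rw [show (s.toList.map PySem.Chars.lowerChar) = (s.toList.map PySem.Chars.lowerChar) from rfl]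
  have := split₀_go_lower s.toList [] []
  simp only [List.map_nil] at this
  rw [this, List.map_map, List.map_map]
  apply List.map_congr_left
  intro cs _
  simp [Function.comp, PySem.Str.lower, PySem.Chars.lower]

-- the common result: keep a word iff its lowering occurs in no later word (and not in s)
def kept : List String → PySem.Set String → List String
  | [], _ => []
  | w :: r, s =>
    if s.contains (PySem.Str.lower w) || decide (PySem.Str.lower w ∈ r.map PySem.Str.lower)
    then kept r s else w :: kept r s

-- ----- A side -----
theorem foldA (ws : List String) (c : PySem.Dict String Int) (acc : List String)
    (h : ∀ w ∈ ws, c.getD (PySem.Str.lower w) 0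
        = ((ws.map PySem.Str.lower).count (PySem.Str.lower w) : Int)) :
    (ws.foldl
      (fun (st : PySem.Dict String Int × List String) word =>
        if st.1.getD (PySem.Str.lower word) 0 > 1 then
          (st.1.modify (PySem.Str.lower word) 0 (· - 1), st.2)
        else
          (st.1, st.2 ++ [word]))
      (c, acc)).2 = acc ++ kept ws PySem.Set.empty := by
  induction ws generalizing c acc with
  | nil => simp [kept]
  | cons w r ih =>
    have hw := h w (List.mem_cons_self)
    rw [List.map_cons, List.count_cons_self] at hw
    by_cases hm : PySem.Str.lower w ∈ r.map PySem.Str.lower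
    · have hcnt : 1 ≤ (r.map PySem.Str.lower).count (PySem.Str.lower w) :=
        List.count_pos_iff.mpr hm
      have hgt : c.getD (PySem.Str.lower w) 0 > 1 := by rw [hw]; push_cast; omega
      simp only [List.foldl_cons, if_pos hgt]
      rw [ih _ acc ?_, kept, if_pos (by simp [hm])]
      intro w' hw'
      rw [PySem.Dict.getD_modify]
      by_cases he : PySem.Str.lower w' = PySem.Str.lower w
      · rw [if_pos he, he, hw]
        push_cast; ring
      · rw [if_neg he, h w' (List.mem_cons_of_mem _ hw'), List.map_cons]
        simp [Ne.symm he]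
    · have hcnt : (r.map PySem.Str.lower).count (PySem.Str.lower w) = 0 :=
        List.count_eq_zero.mpr hm
      have hle : ¬ c.getD (PySem.Str.lower w) 0 > 1 := by rw [hw, hcnt]; norm_num
      simp only [List.foldl_cons, if_neg hle]
      rw [ih _ (acc ++ [w]) ?_, kept, if_neg (by simp [hm]), List.append_assoc]
      · rfl
      intro w' hw'
      rw [h w' (List.mem_cons_of_mem _ hw'), List.map_cons]
      by_cases he : PySem.Str.lower w' = PySem.Str.lower w
      · exact absurd (he ▸ List.mem_map_of_mem hw') hm
      · simp [Ne.symm he]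

-- ----- B side -----
def updSeen (l : List String) (s : PySem.Set String) : PySem.Set String :=
  l.foldl (fun s w => s.add (PySem.Str.lower w)) s

def keptRev : List String → PySem.Set String → List String
  | [], _ => []
  | w :: r, s =>
    if s.contains (PySem.Str.lower w) then keptRev r s
    else w :: keptRev r (s.add (PySem.Str.lower w))

theorem add_of_contains (s : PySem.Set String) (x : String) (h : s.contains x = true) :
    s.add x = s := by
  have hx : x ∈ s := by simpa [PySem.Set.contains, List.contains_iff_mem] using h
  simp [PySem.Set.add, PySem.Set.contains, hx]

theorem foldB (l : List String) (s : PySem.Set String) (acc : List String) :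
    (l.foldl
      (fun (st : PySem.Set String × List String) word =>
        let lw := PySem.Str.lower word
        if st.1.contains lw then st else (st.1.add lw, st.2 ++ [word]))
      (s, acc)) = (updSeen l s, acc ++ keptRev l s) := by
  induction l generalizing s acc with
  | nil => simp [updSeen, keptRev]
  | cons w r ih =>
    simp only [List.foldl_cons, keptRev, updSeen]
    by_cases hc : s.contains (PySem.Str.lower w) = true
    · rw [if_pos hc, if_pos hc, ih]
      simp [updSeen, add_of_contains _ _ hc]
    · rw [if_neg hc, if_neg hc, ih]
      simp [updSeen]

theorem mem_updSeen (l : List String) (s : PySem.Set String) (x : String) :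
    x ∈ updSeen l s ↔ x ∈ s ∨ x ∈ l.map PySem.Str.lower := by
  induction l generalizing s with
  | nil => simp [updSeen]
  | cons w r ih =>
    have : updSeen (w :: r) s = updSeen r (s.add (PySem.Str.lower w)) := rfl
    rw [this, ih]
    simp [PySem.Set.mem_add]
    tauto

theorem contains_updSeen (l : List String) (s : PySem.Set String) (x : String) :
    (updSeen l s).contains x
      = (s.contains x || decide (x ∈ l.map PySem.Str.lower)) := by
  simp [PySem.Set.contains, mem_updSeen]

theorem keptRev_append (a b : List String) (s : PySem.Set String) :
    keptRev (a ++ b) s = keptRev a s ++ keptRev b (updSeen a s) := by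
  induction a generalizing s with
  | nil => simp [keptRev, updSeen]
  | cons w r ih =>
    simp only [List.cons_append, keptRev, updSeen, List.foldl_cons]
    by_cases hc : s.contains (PySem.Str.lower w) = true
    · rw [if_pos hc, if_pos hc, ih]
      simp [updSeen, add_of_contains _ _ hc]
    · rw [if_neg hc, if_neg hc, ih]
      simp [updSeen]

theorem keptRev_reverse (ws : List String) (s : PySem.Set String) :
    (keptRev ws.reverse s).reverse = kept ws s := by
  induction ws generalizing s with
  | nil => simp [keptRev, kept]
  | cons w r ih =>
    rw [List.reverse_cons, keptRev_append, List.reverse_append, ih, kept]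
    have hc : (updSeen r.reverse s).contains (PySem.Str.lower w)
        = (s.contains (PySem.Str.lower w) || decide (PySem.Str.lower w ∈ r.map PySem.Str.lower)) := by
      rw [contains_updSeen]
      simp [List.map_reverse]
    split
    · rename_i h
      simp only [keptRev, hc, h, if_pos]
      simp
    · rename_i h
      simp only [Bool.or_eq_true, not_or, Bool.not_eq_true, decide_eq_true_eq] at h
      simp only [keptRev, hc]
      have h1 : PySem.Str.lower w ∉ s := by
        simpa [PySem.Set.contains, List.contains_iff_mem] using h.1
      rw [if_neg (by simp [PySem.Set.contains, h1, h.2])]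
      simp

theorem mainEq (s : String) :
    PySem.Str.join " "
      ((PySem.Str.split₀ s).foldl
        (fun (st : PySem.Dict String Int × List String) word =>
          if st.1.getD (PySem.Str.lower word) 0 > 1 then
            (st.1.modify (PySem.Str.lower word) 0 (· - 1), st.2)
          else
            (st.1, st.2 ++ [word]))
        (PySem.Dict.counter (PySem.Str.split₀ (PySem.Str.lower s)), [])).2
    = PySem.Str.join " "
      (((PySem.Str.split₀ s).reverse.foldl
        (fun (st : PySem.Set String × List String) word =>
          let lw := PySem.Str.lower word
          if st.1.contains lw then st else (st.1.add lw, st.2 ++ [word]))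
        (PySem.Set.empty, [])).2.reverse) := by
  rw [foldA _ _ _ (fun w _ => by rw [split₀_lower, PySem.Dict.getD_counter]), foldB]
  simp only [List.nil_append]
  rw [keptRev_reverse]

-- ===== VERDICT (by name: the statement is the Claim_ definition above) =====
theorem remove_duplicate_words_spec : Claim_equal_remove_duplicate_words := by
  intro s _
  unfold Spec_remove_duplicate_words remove_duplicate_words remove_duplicate_words_alt
  exact mainEq s
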